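-- pv_equiv track=rewrite | github.com/TeamOfWeekend/py_algorithm | myapp/algo_binary_watch.py | getHourByNum
-- ===== SOURCE A (Python) =====
-- MAX_HOUR_BIT = 3
--
-- MIN_HOUR_BIT = 1
--
-- def getHourByNum(num):
--     base_hours = [1, 2, 4, 8]
--     res_hours = []
--
--     if (num < MIN_HOUR_BIT) or (num > MAX_HOUR_BIT):
--         return None
--     elif 1 == num:
--         res_hours = base_hours[:]
--     elif 2 == num:
--         for i in range(0, len(base_hours)):
--             for j in range(i+1, len(base_hours)):
--                 hour_calc = base_hours[i] + base_hours[j]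
--                 if hour_calc > 12:
--                     continue
--                 res_hours.append(hour_calc)
--     elif 3 == num:
--         for i in range(0, len(base_hours)):
--             for j in range(i+1, len(base_hours)):
--                 for k in range(j+1, len(base_hours)):
--                     hour_calc = base_hours[i] + base_hours[j] + base_hours[k]
--                     if hour_calc > 12:
--                         continue
--                     res_hours.append(hour_calc)
--
--     return res_hours
-- ===== SOURCE B (Python) =====
-- MAX_HOUR_BIT = 3
--
-- MIN_HOUR_BIT = 1
--
-- def _combos(k, items):
--     if k == 0:
--         return [[]]
--     if not items:
--         return []
--     head, rest = items[0], items[1:]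
--     return [[head] + c for c in _combos(k - 1, rest)] + _combos(k, rest)
--
-- def getHourByNum(num):
--     if (num < MIN_HOUR_BIT) or (num > MAX_HOUR_BIT):
--         return None
--     return [s for s in (sum(c) for c in _combos(num, [1, 2, 4, 8])) if s <= 12]
-- ===== Notes on version B (the rewrite author's own statement) =====
-- stated objective: idiomatic
-- what changed: Replaces the three per-bit-count branches of hand-written nested index loops by one generic recursive combinations enumerator whose size-num subsets of [1,2,4,8] are summed and filtered to <= 12.
import Mathlib
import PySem

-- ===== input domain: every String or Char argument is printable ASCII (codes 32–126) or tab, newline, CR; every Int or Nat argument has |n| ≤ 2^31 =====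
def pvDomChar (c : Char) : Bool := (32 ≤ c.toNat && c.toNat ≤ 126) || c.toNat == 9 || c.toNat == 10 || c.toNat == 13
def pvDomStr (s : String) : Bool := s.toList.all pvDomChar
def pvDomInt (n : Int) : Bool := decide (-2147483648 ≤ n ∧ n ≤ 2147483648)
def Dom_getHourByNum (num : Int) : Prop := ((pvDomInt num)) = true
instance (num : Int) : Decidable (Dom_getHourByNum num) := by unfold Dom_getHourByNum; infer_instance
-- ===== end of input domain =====

-- B replaces A's three hand-written nested-loop branches by one generic recursive
-- combinations enumerator (idiomatic decomposition; same cost, fixed-size input).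

-- ===== PORT A =====
def getHourByNum (num : Int) : Option (List Int) :=
  let base_hours : List Int := [1, 2, 4, 8]
  if num < 1 ∨ num > 3 then
    none
  else if 1 == num then
    some base_hours            -- base_hours[:] (copy; identical as a value)
  else if 2 == num then
    some ((PySem.List.pyRange 0 4 1).foldl (fun acc i =>
      (PySem.List.pyRange (i + 1) 4 1).foldl (fun acc j =>
        let hour_calc := PySem.List.pyGetD base_hours i 0 + PySem.List.pyGetD base_hours j 0
        if hour_calc > 12 then acc else acc ++ [hour_calc]) acc) [])
  else if 3 == num then
    some ((PySem.List.pyRange 0 4 1).foldl (fun acc i =>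
      (PySem.List.pyRange (i + 1) 4 1).foldl (fun acc j =>
        (PySem.List.pyRange (j + 1) 4 1).foldl (fun acc k =>
          let hour_calc := PySem.List.pyGetD base_hours i 0 + PySem.List.pyGetD base_hours j 0
                           + PySem.List.pyGetD base_hours k 0
          if hour_calc > 12 then acc else acc ++ [hour_calc]) acc) acc) [])
  else
    some []

-- ===== PORT B =====
-- recursive combinations in itertools index order, as in Source B's _combos
def pvCombos (k : Int) (items : List Int) : List (List Int) :=
  if k == 0 then [[]]
  else
    match items with
    | [] => []
    | head :: rest => (pvCombos (k - 1) rest).map (fun c => head :: c) ++ pvCombos k rest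

def getHourByNum_alt (num : Int) : Option (List Int) :=
  if num < 1 ∨ num > 3 then
    none
  else
    some (((pvCombos num [1, 2, 4, 8]).map (fun c => c.foldl (· + ·) 0)).filter (fun s => s ≤ 12))

-- ===== PRECONDITION & SPEC =====
def Spec_getHourByNum (num : Int) (out : Option (List Int)) : Prop := out = getHourByNum_alt num
instance (num : Int) (out : Option (List Int)) : Decidable (Spec_getHourByNum num out) := by unfold Spec_getHourByNum; infer_instance

-- ===== CLAIM (what is proved, stated in full; the proofs are below) =====
def Claim_equal_getHourByNum : Prop := ∀ (num : Int), Dom_getHourByNum num → Spec_getHourByNum num (getHourByNum num)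

-- ===== LEMMAS AND PROOFS =====

-- ===== VERDICT (by name: the statement is the Claim_ definition above) =====
theorem getHourByNum_spec : Claim_equal_getHourByNum := by
  intro num _
  unfold Spec_getHourByNum
  by_cases h : num < 1 ∨ num > 3
  · simp [getHourByNum, getHourByNum_alt, h]
  · have h3 : num = 1 ∨ num = 2 ∨ num = 3 := by omega
    rcases h3 with rfl | rfl | rfl <;> decide
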